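-- pv_equiv track=rewrite | github.com/c3rb3ru5d3d53c/binlex | plugins/ida/ui/launcher.py | _subsequence_score
-- ===== SOURCE A (Python) =====
-- def _subsequence_score(query: str, text: str) -> tuple[int, int] | None:
--     start = -1
--     position = 0
--     gap_penalty = 0
--
--     for char in query:
--         index = text.find(char, position)
--         if index < 0:
--             return None
--         if start < 0:
--             start = index
--         gap_penalty += index - position
--         position = index + 1
--
--     span = position - start
--     return (gap_penalty + start, span)
-- ===== SOURCE B (Python) =====
-- def _subsequence_score(query: str, text: str) -> tuple[int, int] | None:
--     # Single forward scan of text with a pointer into query (loop inverted vs. repeated str.find).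
--     start = -1
--     position = 0
--     gap_penalty = 0
--     j = 0
--     n = len(query)
--     for i, c in enumerate(text):
--         if j < n and c == query[j]:
--             if start < 0:
--                 start = i
--             gap_penalty += i - position
--             position = i + 1
--             j += 1
--             if j == n:
--                 break
--     if j < n:
--         return None
--     return (gap_penalty + start, position - start)
-- ===== Notes on version B (the rewrite author's own statement) =====
-- stated objective: alternative
-- what changed: Replaces the query-driven loop of repeated str.find(char, position) calls with a single forward scan of text carrying a pointer into query, accumulating start/gap_penalty/position inline.
import Mathlib
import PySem

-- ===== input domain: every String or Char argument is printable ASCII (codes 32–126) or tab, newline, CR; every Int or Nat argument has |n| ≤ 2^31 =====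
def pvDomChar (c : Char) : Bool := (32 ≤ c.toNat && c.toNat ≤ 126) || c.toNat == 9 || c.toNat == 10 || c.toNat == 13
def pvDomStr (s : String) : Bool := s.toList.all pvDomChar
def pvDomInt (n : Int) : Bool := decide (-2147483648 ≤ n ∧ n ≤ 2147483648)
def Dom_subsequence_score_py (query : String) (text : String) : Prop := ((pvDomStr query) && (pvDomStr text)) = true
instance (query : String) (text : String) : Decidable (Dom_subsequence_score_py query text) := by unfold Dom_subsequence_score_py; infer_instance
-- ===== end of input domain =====

-- B inverts the loop: one forward scan of text with a pointer into query, instead of A's repeated find(char, position); same return value everywhere (alternative decomposition, no speed claim).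

-- ===== PORT A =====
-- hand port of Python str.find(c, pos) for 0 ≤ pos: first index ≥ pos holding c, else -1 (exact on this use: pos is a Nat here)
def pvFindFromAux (s : List Char) (c : Char) (pos : Nat) : Int :=
  match s with
  | [] => -1
  | x :: xs => if x = c then (pos : Int) else pvFindFromAux xs c (pos + 1)

def pvFindFrom (t : List Char) (c : Char) (pos : Nat) : Int :=
  pvFindFromAux (t.drop pos) c pos

-- the 'for char in query' loop of A, state (start, position, gap_penalty)
def pvLoopA (t : List Char) : List Char → Int → Nat → Int → Option (Int × Int)
  | [], start, position, gap => some (gap + start, (position : Int) - start)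
  | c :: qs, start, position, gap =>
    let index := pvFindFrom t c position
    if index < 0 then none
    else pvLoopA t qs (if start < 0 then index else start) (index.toNat + 1)
           (gap + index - (position : Int))

def subsequence_score_py (query : String) (text : String) : Option (Int × Int) :=
  pvLoopA text.toList query.toList (-1) 0 0

-- ===== PORT B =====
-- the 'for i, c in enumerate(text)' loop of B, state (i, j, start, position, gap_penalty)
def pvLoopB (q : List Char) : List Char → Nat → Nat → Int → Nat → Int → Option (Int × Int)
  | [], _, j, start, position, gap =>
      if j < q.length then none else some (gap + start, (position : Int) - start)
  | c :: ts, i, j, start, position, gap =>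
      match q[j]? with
      | some qc =>
        if c = qc then
          let start' := if start < 0 then (i : Int) else start
          let gap' := gap + (i : Int) - (position : Int)
          if j + 1 = q.length then some (gap' + start', ((i + 1 : Nat) : Int) - start')
          else pvLoopB q ts (i + 1) (j + 1) start' (i + 1) gap'
        else pvLoopB q ts (i + 1) j start position gap
      | none => pvLoopB q ts (i + 1) j start position gap

def subsequence_score_py_alt (query : String) (text : String) : Option (Int × Int) :=
  pvLoopB query.toList text.toList 0 0 (-1) 0 0

-- ===== PRECONDITION & SPEC =====
def Spec_subsequence_score_py (query : String) (text : String) (out : Option (Int × Int)) : Prop := out = subsequence_score_py_alt query text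
instance (query : String) (text : String) (out : Option (Int × Int)) : Decidable (Spec_subsequence_score_py query text out) := by unfold Spec_subsequence_score_py; infer_instance

-- ===== CLAIM (what is proved, stated in full; the proofs are below) =====
def Claim_equal_subsequence_score_py : Prop := ∀ (query : String) (text : String), Dom_subsequence_score_py query text → Spec_subsequence_score_py query text (subsequence_score_py query text)

-- ===== LEMMAS AND PROOFS =====

-- when the whole query is already matched (only reachable with q = [] initially), B's scan is inert
lemma pvLoopB_done (q : List Char) (ts : List Char) :
    ∀ i j start position gap, q.length ≤ j →
      pvLoopB q ts i j start position gap = some (gap + start, (position : Int) - start) := by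
  induction ts with
  | nil =>
    intro i j start position gap h
    simp [pvLoopB, Nat.not_lt.mpr h]
  | cons c ts ih =>
    intro i j start position gap h
    have : q[j]? = none := by simpa using List.getElem?_eq_none h
    simp [pvLoopB, this, ih _ _ _ _ _ h]

-- the bridge: scanning the suffix text.drop i with query pointer j equals A's loop on query.drop j
lemma pvBridge (t q : List Char) :
    ∀ ts i j start position gap (_ : ts = t.drop i) (_ : j < q.length)
      (_ : pvFindFromAux (t.drop position) q[j] position = pvFindFromAux ts q[j] i),
      pvLoopB q ts i j start position gap = pvLoopA t (q.drop j) start position gap := by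
  intro ts
  induction ts with
  | nil =>
    intro i j start position gap hts hj H
    have hq : q.drop j = q[j] :: q.drop (j + 1) := (List.getElem_cons_drop hj).symm
    have hidx : pvFindFrom t q[j] position = -1 := by
      simp [pvFindFrom, H, pvFindFromAux]
    rw [hq]
    simp [pvLoopB, hj, pvLoopA, hidx]
  | cons c ts ih =>
    intro i j start position gap hts hj H
    have hq : q.drop j = q[j] :: q.drop (j + 1) := (List.getElem_cons_drop hj).symm
    have hget : q[j]? = some q[j] := List.getElem?_eq_getElem hj
    have hts' : ts = t.drop (i + 1) := by
      have := congrArg List.tail hts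
      simpa [List.tail_drop] using this
    by_cases hc : c = q[j]
    · -- match step
      have hidx : pvFindFrom t q[j] position = (i : Int) := by
        simp [pvFindFrom, H, pvFindFromAux, hc]
      by_cases hlast : j + 1 = q.length
      · simp [pvLoopB, hget, hc, hlast, hq, pvLoopA, hidx]
      · have hj' : j + 1 < q.length := lt_of_le_of_ne hj hlast
        have H' : pvFindFromAux (t.drop (i + 1)) q[j + 1] (i + 1)
            = pvFindFromAux ts q[j + 1] (i + 1) := by rw [hts']
        have := ih (i + 1) (j + 1) (if start < 0 then (i : Int) else start) (i + 1)
          (gap + (i : Int) - (position : Int)) hts' hj' H'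
        simp only [pvLoopB, hget, hc, hlast, ite_true]
        rw [hq]
        simp only [pvLoopA, hidx]
        rw [if_neg (by omega : ¬ ((i : Int) < 0))]
        simpa [Int.toNat_natCast] using this
    · -- skip step
      have H' : pvFindFromAux (t.drop position) q[j] position
          = pvFindFromAux ts q[j] (i + 1) := by
        rw [H]; simp [pvFindFromAux, hc]
      have := ih (i + 1) j start position gap hts' hj H'
      simp [pvLoopB, hget, hc, this]

-- ===== VERDICT (by name: the statement is the Claim_ definition above) =====
theorem subsequence_score_py_spec : Claim_equal_subsequence_score_py := by
  intro query text _
  unfold Spec_subsequence_score_py subsequence_score_py subsequence_score_py_alt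
  cases hq : query.toList with
  | nil =>
    rw [pvLoopB_done _ _ 0 0 (-1) 0 0 (by simp)]
    simp [pvLoopA]
  | cons c qs =>
    exact (pvBridge text.toList (c :: qs) text.toList 0 0 (-1) 0 0 rfl (by simp) rfl).symm
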